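-- pv_equiv track=rewrite | github.com/mutl3y/prism | src/prism/scanner_style_vars.py | _render_role_notes_section
-- ===== SOURCE A (Python) =====
-- def _render_role_notes_section(role_notes: dict | None) -> str:
--     """Render comment-driven role notes in a readable markdown block."""
--     notes = role_notes or {}
--     warnings = notes.get("warnings") or []
--     deprecations = notes.get("deprecations") or []
--     general = notes.get("notes") or []
--     additionals = notes.get("additionals") or []
--     if not warnings and not deprecations and not general and not additionals:
--         return "No role notes were found in comment annotations."
--
--     lines: list[str] = []
--     if warnings:
--         lines.append("Warnings:")
--         lines.extend(f"- {item}" for item in warnings)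
--     if deprecations:
--         if lines:
--             lines.append("")
--         lines.append("Deprecations:")
--         lines.extend(f"- {item}" for item in deprecations)
--     if general:
--         if lines:
--             lines.append("")
--         lines.append("Notes:")
--         lines.extend(f"- {item}" for item in general)
--     if additionals:
--         if lines:
--             lines.append("")
--         lines.append("Additionals:")
--         lines.extend(f"- {item}" for item in additionals)
--     return "\n".join(lines)
-- ===== SOURCE B (Python) =====
-- _SECTIONS = (
--     ("warnings", "Warnings:"),
--     ("deprecations", "Deprecations:"),
--     ("notes", "Notes:"),
--     ("additionals", "Additionals:"),
-- )
--
--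
-- def _render_role_notes_section(role_notes: dict | None) -> str:
--     """Render comment-driven role notes in a readable markdown block."""
--     notes = role_notes or {}
--     blocks = []
--     for key, header in _SECTIONS:
--         items = notes.get(key) or []
--         if items:
--             blocks.append("\n".join([header, *(f"- {item}" for item in items)]))
--     if not blocks:
--         return "No role notes were found in comment annotations."
--     return "\n\n".join(blocks)
-- ===== Notes on version B (the rewrite author's own statement) =====
-- stated objective: simpler
-- what changed: B drives the four sections from a (key, header) table, builds one joined block string per non-empty section, and returns the blocks joined by '\n\n', replacing A's four unrolled branches with manual 'if lines: append blank line' separator bookkeeping.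
import Mathlib
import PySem

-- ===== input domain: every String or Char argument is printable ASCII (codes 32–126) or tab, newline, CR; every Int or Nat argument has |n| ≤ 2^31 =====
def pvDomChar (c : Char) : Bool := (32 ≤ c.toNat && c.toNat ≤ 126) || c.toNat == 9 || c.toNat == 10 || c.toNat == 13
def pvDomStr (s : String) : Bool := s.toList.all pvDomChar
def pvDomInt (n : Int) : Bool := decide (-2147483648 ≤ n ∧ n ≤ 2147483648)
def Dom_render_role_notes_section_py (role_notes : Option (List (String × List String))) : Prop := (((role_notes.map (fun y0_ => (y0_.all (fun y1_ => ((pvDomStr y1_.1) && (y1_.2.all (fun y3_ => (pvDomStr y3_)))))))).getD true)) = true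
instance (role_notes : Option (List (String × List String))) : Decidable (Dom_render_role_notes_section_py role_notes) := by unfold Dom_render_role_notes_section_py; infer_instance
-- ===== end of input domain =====

-- B replaces A's unrolled section branches (with manual blank-line separator bookkeeping)
-- by a table-driven loop that builds one block string per non-empty section and joins the
-- blocks with "\n\n" — same output, a simpler decomposition.


-- ===== PORT A =====
def render_role_notes_section_py (role_notes : Option (List (String × List String))) : String :=
  let notes := role_notes.getD []
  let warnings := (PySem.Dict.get? ⟨notes⟩ "warnings").getD []
  let deprecations := (PySem.Dict.get? ⟨notes⟩ "deprecations").getD []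
  let general := (PySem.Dict.get? ⟨notes⟩ "notes").getD []
  let additionals := (PySem.Dict.get? ⟨notes⟩ "additionals").getD []
  if warnings = [] ∧ deprecations = [] ∧ general = [] ∧ additionals = [] then
    "No role notes were found in comment annotations."
  else
    let lines : List String := []
    let lines :=
      if warnings ≠ [] then
        lines ++ ["Warnings:"] ++ warnings.map (fun item => "- " ++ item)
      else lines
    let lines :=
      if deprecations ≠ [] then
        (if lines ≠ [] then lines ++ [""] else lines)
          ++ ["Deprecations:"] ++ deprecations.map (fun item => "- " ++ item)
      else lines
    let lines :=
      if general ≠ [] then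
        (if lines ≠ [] then lines ++ [""] else lines)
          ++ ["Notes:"] ++ general.map (fun item => "- " ++ item)
      else lines
    let lines :=
      if additionals ≠ [] then
        (if lines ≠ [] then lines ++ [""] else lines)
          ++ ["Additionals:"] ++ additionals.map (fun item => "- " ++ item)
      else lines
    PySem.Str.join "\n" lines

-- ===== PORT B =====
def pvSections : List (String × String) :=
  [("warnings", "Warnings:"), ("deprecations", "Deprecations:"),
   ("notes", "Notes:"), ("additionals", "Additionals:")]

def render_role_notes_section_py_alt (role_notes : Option (List (String × List String))) : String :=
  let notes := role_notes.getD []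
  let blocks := pvSections.foldl
    (fun blocks kh =>
      let items := (PySem.Dict.get? ⟨notes⟩ kh.1).getD []
      if items ≠ [] then
        blocks ++ [PySem.Str.join "\n" (kh.2 :: items.map (fun item => "- " ++ item))]
      else blocks)
    []
  if blocks = [] then "No role notes were found in comment annotations."
  else PySem.Str.join "\n\n" blocks

-- ===== PRECONDITION & SPEC =====
def Spec_render_role_notes_section_py (role_notes : Option (List (String × List String))) (out : String) : Prop := out = render_role_notes_section_py_alt role_notes
instance (role_notes : Option (List (String × List String))) (out : String) : Decidable (Spec_render_role_notes_section_py role_notes out) := by unfold Spec_render_role_notes_section_py; infer_instance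

-- ===== CLAIM (what is proved, stated in full; the proofs are below) =====
def Claim_equal_render_role_notes_section_py : Prop := ∀ (role_notes : Option (List (String × List String))), Dom_render_role_notes_section_py role_notes → Spec_render_role_notes_section_py role_notes (render_role_notes_section_py role_notes)

-- ===== LEMMAS AND PROOFS =====

theorem pv_str_join_singleton (sep s : String) : PySem.Str.join sep [s] = s := by
  simp [PySem.Str.join, PySem.Chars.join, List.intercalate, String.ofList_toList]

theorem pv_str_join_cons_cons (sep p q : String) (rest : List String) :
    PySem.Str.join sep (p :: q :: rest) = p ++ sep ++ PySem.Str.join sep (q :: rest) := by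
  simp [PySem.Str.join, PySem.Chars.join_cons_cons, String.append_assoc]

theorem pv_chars_join_split (a : List Char) (l1 : List (List Char)) (b : List Char)
    (l2 : List (List Char)) :
    PySem.Chars.join ['\n'] (a :: (l1 ++ [] :: b :: l2)) =
      PySem.Chars.join ['\n'] (a :: l1) ++ '\n' :: '\n' :: PySem.Chars.join ['\n'] (b :: l2) := by
  induction l1 generalizing a with
  | nil => simp [PySem.Chars.join_cons_cons]
  | cons x xs ih => simp [PySem.Chars.join_cons_cons, ih x]

theorem pv_str_join_split (a : String) (l1 : List String) (b : String) (l2 : List String) :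
    PySem.Str.join "\n" (a :: (l1 ++ "" :: b :: l2)) =
      PySem.Str.join "\n" (a :: l1) ++ "\n\n" ++ PySem.Str.join "\n" (b :: l2) := by
  apply String.toList_inj.mp
  simp [PySem.Str.toList_join, String.toList_append]
  have h := pv_chars_join_split a.toList (l1.map String.toList) b.toList (l2.map String.toList)
  simp at h
  convert h using 2

-- ===== VERDICT (by name: the statement is the Claim_ definition above) =====
theorem render_role_notes_section_py_spec : Claim_equal_render_role_notes_section_py := by
  intro rn _
  unfold Spec_render_role_notes_section_py
  simp only [render_role_notes_section_py, render_role_notes_section_py_alt, pvSections,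
    List.foldl_cons, List.foldl_nil]
  generalize (PySem.Dict.get? ⟨rn.getD []⟩ "warnings").getD [] = w
  generalize (PySem.Dict.get? ⟨rn.getD []⟩ "deprecations").getD [] = d
  generalize (PySem.Dict.get? ⟨rn.getD []⟩ "notes").getD [] = g
  generalize (PySem.Dict.get? ⟨rn.getD []⟩ "additionals").getD [] = a
  by_cases hw : w = [] <;> by_cases hd : d = [] <;> by_cases hg : g = [] <;> by_cases ha : a = [] <;>
    simp [hw, hd, hg, ha, pv_str_join_split, pv_str_join_cons_cons, pv_str_join_singleton,
      String.append_assoc]
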